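-- pv_equiv track=rewrite | github.com/vincent-kk/Basic-Algorithm | 13. Stack/2304.py | solution
-- ===== SOURCE A (Python) =====
-- from typing import List, Tuple
--
-- def solution(N: int, data: List[Tuple[int]]):
--     sorted_data = sorted(data, key=lambda x: -x[1])
--     center = sorted_data[0]
--     left = right = center[0]
--     result = center[1]
--     for row in sorted_data[1:]:
--         if row[0] > left:
--             result += abs(row[0] - left) * row[1]
--             left = row[0]
--         if row[0] < right:
--             result += abs(row[0] - right) * row[1]
--             right = row[0]
--
--     return result
-- ===== SOURCE B (Python) =====
-- def solution(N, data):
--     xs = sorted(data, key=lambda t: t[0])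
--     hmax = xs[0][1]
--     for _, h in xs:
--         if h > hmax:
--             hmax = h
--     i = 0
--     while xs[i][1] != hmax:
--         i += 1
--     left = xs[:i + 1]                                   # leftmost pillar .. first tallest
--     right = [(-x, h) for (x, h) in reversed(xs[i:])]    # mirrored: rightmost pillar .. first tallest
--     return hmax + _sweep(left) + _sweep(right)
--
-- def _sweep(part):
--     # part is position-sorted; area under the running-max roof, half-open columns
--     run = part[0][1]
--     area = 0
--     for a, b in zip(part, part[1:]):
--         run = max(run, a[1])
--         area += (b[0] - a[0]) * run
--     return area
-- ===== Notes on version B (the rewrite author's own statement) =====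
-- stated objective: alternative
-- what changed: A sorts pillars by height descending and grows left/right boundaries from the tallest pillar; B sorts by position ascending, locates the first tallest pillar, and accumulates the area with two running-maximum sweeps (the right one done by mirroring and reusing the left sweep).
import Mathlib
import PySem

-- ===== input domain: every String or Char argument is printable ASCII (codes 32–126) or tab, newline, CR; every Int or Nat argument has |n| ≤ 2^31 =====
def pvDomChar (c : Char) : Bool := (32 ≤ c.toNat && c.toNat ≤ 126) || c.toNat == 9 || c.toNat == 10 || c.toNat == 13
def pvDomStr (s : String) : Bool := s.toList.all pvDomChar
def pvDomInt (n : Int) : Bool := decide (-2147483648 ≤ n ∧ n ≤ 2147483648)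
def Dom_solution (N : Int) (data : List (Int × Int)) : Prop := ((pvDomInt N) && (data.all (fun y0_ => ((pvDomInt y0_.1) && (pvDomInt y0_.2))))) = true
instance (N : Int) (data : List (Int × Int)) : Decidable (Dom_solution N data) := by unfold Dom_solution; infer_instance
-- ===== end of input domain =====

-- B is a different decomposition of the same exact computation: A sorts by height descending and
-- grows the [right,left] position span outward from the tallest pillar; B sorts by position,
-- splits at the first tallest pillar and adds up the roof with two running-maximum sweeps.

-- ===== PORT A =====
-- loop body of A: state (left, right, result), row = (position, height)
def pvStepA (st : Int × Int × Int) (row : Int × Int) : Int × Int × Int :=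
  let s1 : Int × Int :=
    if row.1 > st.1 then (row.1, st.2.2 + |row.1 - st.1| * row.2) else (st.1, st.2.2)
  let s2 : Int × Int :=
    if row.1 < st.2.1 then (row.1, s1.2 + |row.1 - st.2.1| * row.2) else (st.2.1, s1.2)
  (s1.1, s2.1, s2.2)

def solution (N : Int) (data : List (Int × Int)) : Int :=
  match PySem.List.sorted data (fun x => -x.2) with
  | [] => 0   -- sorted_data[0] raises IndexError; excluded by Pre_solution
  | c :: rest => (rest.foldl pvStepA (c.1, c.1, c.2)).2.2

-- ===== PORT B =====
-- running-max sweep over adjacent pairs of a position-sorted part (Source B's _sweep loop)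
def pvSweepGo (run : Int) : List (Int × Int) → Int
  | a :: b :: t => (b.1 - a.1) * (max run a.2) + pvSweepGo (max run a.2) (b :: t)
  | _ => 0

def pvSweep : List (Int × Int) → Int
  | [] => 0   -- part[0] raises IndexError; B never calls _sweep on an empty part
  | a :: t => pvSweepGo a.2 (a :: t)

-- Source B's while loop + the two slices: (xs[:i+1], xs[i:]) at the first pillar of maximal height
def pvSplit (hmax : Int) : List (Int × Int) → List (Int × Int) × List (Int × Int)
  | [] => ([], [])
  | q :: t =>
    if q.2 == hmax then ([q], q :: t)
    else let p := pvSplit hmax t; (q :: p.1, p.2)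

def solution_alt (N : Int) (data : List (Int × Int)) : Int :=
  match PySem.List.sorted data (fun t => t.1) with
  | [] => 0   -- xs[0] raises IndexError; excluded by Pre_solution
  | a :: t =>
    let hmax := (a :: t).foldl (fun m q => if q.2 > m then q.2 else m) a.2
    let p := pvSplit hmax (a :: t)
    hmax + pvSweep p.1 + pvSweep (p.2.reverse.map (fun q => (-q.1, q.2)))

-- ===== PRECONDITION & SPEC =====
-- Pre_ excludes only the empty list, on which both A and B raise IndexError.
def Pre_solution (N : Int) (data : List (Int × Int)) : Prop := data ≠ []
instance (N : Int) (data : List (Int × Int)) : Decidable (Pre_solution N data) := by unfold Pre_solution; infer_instance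
def pvWitness_solution : Int × (List (Int × Int)) := (4, [(2, 1), (0, 3), (3, 2)])

def Spec_solution (N : Int) (data : List (Int × Int)) (out : Int) : Prop := out = solution_alt N data
instance (N : Int) (data : List (Int × Int)) (out : Int) : Decidable (Spec_solution N data out) := by unfold Spec_solution; infer_instance

-- ===== CLAIM (what is proved, stated in full; the proofs are below) =====
def Claim_equal_solution : Prop := ∀ (N : Int) (data : List (Int × Int)), Dom_solution N data → Pre_solution N data → Spec_solution N data (solution N data)

-- ===== LEMMAS AND PROOFS =====

-- A sentinel strictly below every height admitted by Dom_solution (|h| ≤ 2^31).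
def pvJ : Int := -4294967296

-- max-fold over a list of heights
def pvF (l : List Int) : Int := l.foldr max pvJ

-- Lm T x: tallest height among pillars of T at position ≤ x; Rm: at position ≥ x.
def pvLm (T : List (Int × Int)) (x : Int) : Int := pvF ((T.filter (fun q => decide (q.1 ≤ x))).map Prod.snd)
def pvRm (T : List (Int × Int)) (x : Int) : Int := pvF ((T.filter (fun q => decide (x ≤ q.1))).map Prod.snd)

-- the common reference value: area of the roof over the columns of Icc lo hi, split at the center position
noncomputable def pvArea (cpos lo hi : Int) (T : List (Int × Int)) : Int :=
  ∑ x ∈ Finset.Icc lo hi, (if x ≤ cpos then pvLm T x else pvRm T x)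

lemma pvF_nil : pvF [] = pvJ := rfl
lemma pvF_cons (a : Int) (l : List Int) : pvF (a :: l) = max a (pvF l) := rfl

lemma pvF_le_of_mem {a : Int} {l : List Int} (h : a ∈ l) : a ≤ pvF l := by
  induction l with
  | nil => cases h
  | cons b t ih =>
    rcases List.mem_cons.mp h with rfl | h
    · exact le_max_left _ _
    · exact le_trans (ih h) (le_max_right _ _)

lemma pvJ_le_pvF (l : List Int) : pvJ ≤ pvF l := by
  induction l with
  | nil => exact le_refl _
  | cons b t ih => exact le_trans ih (le_max_right _ _)

lemma pvF_le {l : List Int} {m : Int} (hm : pvJ ≤ m) (h : ∀ a ∈ l, a ≤ m) : pvF l ≤ m := by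
  induction l with
  | nil => exact hm
  | cons b t ih =>
    rw [pvF_cons]
    exact max_le (h b (List.mem_cons_self)) (ih (fun a ha => h a (List.mem_cons_of_mem _ ha)))

lemma pvF_append (l l' : List Int) : pvF (l ++ l') = max (pvF l) (pvF l') := by
  induction l with
  | nil => simp [pvF_nil, max_eq_right (pvJ_le_pvF l')]
  | cons b t ih => simp [pvF_cons, ih, max_assoc]

lemma pvF_perm {l l' : List Int} (h : l.Perm l') : pvF l = pvF l' := by
  unfold pvF
  exact h.foldr_eq (lcomm := ⟨fun a b c => by simp [max_left_comm]⟩) _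

-- Lm / Rm on a single appended pillar
lemma pvLm_append (T : List (Int × Int)) (q : Int × Int) (x : Int) (hJ : pvJ ≤ q.2) :
    pvLm (T ++ [q]) x = if q.1 ≤ x then max (pvLm T x) q.2 else pvLm T x := by
  unfold pvLm
  rw [List.filter_append]
  by_cases h : q.1 ≤ x
  · have hf : List.filter (fun q' => decide (q'.1 ≤ x)) [q] = [q] := by simp [h]
    rw [hf, List.map_append, pvF_append]
    simp [h, pvF_cons, pvF_nil, max_eq_left hJ]
  · have hf : List.filter (fun q' => decide (q'.1 ≤ x)) [q] = [] := by simp [h]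
    rw [hf, List.map_append, pvF_append]
    simp [h, pvF_nil, max_eq_left (pvJ_le_pvF _)]

lemma pvRm_append (T : List (Int × Int)) (q : Int × Int) (x : Int) (hJ : pvJ ≤ q.2) :
    pvRm (T ++ [q]) x = if x ≤ q.1 then max (pvRm T x) q.2 else pvRm T x := by
  unfold pvRm
  rw [List.filter_append]
  by_cases h : x ≤ q.1
  · have hf : List.filter (fun q' => decide (x ≤ q'.1)) [q] = [q] := by simp [h]
    rw [hf, List.map_append, pvF_append]
    simp [h, pvF_cons, pvF_nil, max_eq_left hJ]
  · have hf : List.filter (fun q' => decide (x ≤ q'.1)) [q] = [] := by simp [h]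
    rw [hf, List.map_append, pvF_append]
    simp [h, pvF_nil, max_eq_left (pvJ_le_pvF _)]

lemma pvLm_cons (a : Int × Int) (T : List (Int × Int)) (x : Int) :
    pvLm (a :: T) x = if a.1 ≤ x then max a.2 (pvLm T x) else pvLm T x := by
  unfold pvLm
  by_cases h : a.1 ≤ x <;> simp [h, pvF_cons]

-- absorption: a pillar no taller than a pillar already counted changes nothing
lemma pvLm_absorb {T : List (Int × Int)} {t : Int × Int} {x h2 : Int}
    (ht : t ∈ T) (hx : t.1 ≤ x) (hle : h2 ≤ t.2) : max (pvLm T x) h2 = pvLm T x := by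
  apply max_eq_left
  apply le_trans hle
  apply pvF_le_of_mem
  exact List.mem_map_of_mem (List.mem_filter.mpr ⟨ht, by simpa using hx⟩)

lemma pvRm_absorb {T : List (Int × Int)} {t : Int × Int} {x h2 : Int}
    (ht : t ∈ T) (hx : x ≤ t.1) (hle : h2 ≤ t.2) : max (pvRm T x) h2 = pvRm T x := by
  apply max_eq_left
  apply le_trans hle
  apply pvF_le_of_mem
  exact List.mem_map_of_mem (List.mem_filter.mpr ⟨ht, by simpa using hx⟩)

lemma pvLm_perm {T T' : List (Int × Int)} (h : T.Perm T') (x : Int) : pvLm T x = pvLm T' x :=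
  pvF_perm (((h.filter _).map _))

lemma pvRm_perm {T T' : List (Int × Int)} (h : T.Perm T') (x : Int) : pvRm T x = pvRm T' x :=
  pvF_perm (((h.filter _).map _))

lemma pvArea_perm {T T' : List (Int × Int)} (h : T.Perm T') (c lo hi : Int) :
    pvArea c lo hi T = pvArea c lo hi T' := by
  unfold pvArea
  exact Finset.sum_congr rfl fun x _ => by rw [pvLm_perm h, pvRm_perm h]

-- interval splitting helpers on ℤ
lemma pvSum_split (f : Int → Int) {lo m hi : Int} (h1 : lo ≤ m) (h2 : m ≤ hi) :
    ∑ x ∈ Finset.Icc lo hi, f x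
      = (∑ x ∈ Finset.Ico lo m, f x) + f m + ∑ x ∈ Finset.Ioc m hi, f x := by
  have hu1 : Finset.Icc lo hi = (Finset.Ico lo m ∪ Finset.Icc m hi) := by
    ext x; simp only [Finset.mem_Icc, Finset.mem_union, Finset.mem_Ico]; omega
  have hu2 : Finset.Icc m hi = ({m} : Finset Int) ∪ Finset.Ioc m hi := by
    ext x; simp only [Finset.mem_Icc, Finset.mem_union, Finset.mem_Ioc, Finset.mem_singleton]; omega
  rw [hu1, Finset.sum_union (by
    rw [Finset.disjoint_left]; intro x hx hy
    simp only [Finset.mem_Ico] at hx; simp only [Finset.mem_Icc] at hy; omega)]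
  rw [hu2, Finset.sum_union (by
    rw [Finset.disjoint_left]; intro x hx hy
    simp only [Finset.mem_singleton] at hx; simp only [Finset.mem_Ioc] at hy; omega)]
  simp [add_assoc]

lemma pvSum_splitIoc (f : Int → Int) {lo hi hi' : Int} (h1 : lo ≤ hi) (h2 : hi ≤ hi') :
    ∑ x ∈ Finset.Icc lo hi', f x
      = (∑ x ∈ Finset.Icc lo hi, f x) + ∑ x ∈ Finset.Ioc hi hi', f x := by
  have hu : Finset.Icc lo hi' = (Finset.Icc lo hi ∪ Finset.Ioc hi hi') := by
    ext x; simp only [Finset.mem_Icc, Finset.mem_union, Finset.mem_Ioc]; omega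
  rw [hu, Finset.sum_union (by
    rw [Finset.disjoint_left]; intro x hx hy
    simp only [Finset.mem_Icc] at hx; simp only [Finset.mem_Ioc] at hy; omega)]

lemma pvSum_splitIco (f : Int → Int) {lo' lo hi : Int} (h1 : lo' ≤ lo) (h2 : lo ≤ hi) :
    ∑ x ∈ Finset.Icc lo' hi, f x
      = (∑ x ∈ Finset.Ico lo' lo, f x) + ∑ x ∈ Finset.Icc lo hi, f x := by
  have hu : Finset.Icc lo' hi = (Finset.Ico lo' lo ∪ Finset.Icc lo hi) := by
    ext x; simp only [Finset.mem_Icc, Finset.mem_union, Finset.mem_Ico]; omega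
  rw [hu, Finset.sum_union (by
    rw [Finset.disjoint_left]; intro x hx hy
    simp only [Finset.mem_Ico] at hx; simp only [Finset.mem_Icc] at hy; omega)]

lemma pvSum_constIoc (c : Int) {a b : Int} (h : a ≤ b) :
    ∑ _x ∈ Finset.Ioc a b, c = (b - a) * c := by
  rw [Finset.sum_const, Int.card_Ioc, nsmul_eq_mul]
  congr 1
  omega

lemma pvSum_constIco (c : Int) {a b : Int} (h : a ≤ b) :
    ∑ _x ∈ Finset.Ico a b, c = (b - a) * c := by
  rw [Finset.sum_const, Int.card_Ico, nsmul_eq_mul]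
  congr 1
  omega

lemma pvLm_empty {T : List (Int × Int)} {x : Int} (h : ∀ t ∈ T, x < t.1) : pvLm T x = pvJ := by
  unfold pvLm
  have : T.filter (fun q => decide (q.1 ≤ x)) = [] :=
    List.filter_eq_nil_iff.mpr (fun t ht => by simpa using not_le.mpr (h t ht))
  rw [this]; rfl

lemma pvRm_empty {T : List (Int × Int)} {x : Int} (h : ∀ t ∈ T, t.1 < x) : pvRm T x = pvJ := by
  unfold pvRm
  have : T.filter (fun q => decide (x ≤ q.1)) = [] :=
    List.filter_eq_nil_iff.mpr (fun t ht => by simpa using not_le.mpr (h t ht))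
  rw [this]; rfl

-- ===== Area step lemmas (A's loop) =====

-- a pillar inside the current span adds nothing
lemma pvArea_inside {T : List (Int × Int)} {q : Int × Int} {c lo hi : Int}
    (hwl : ∃ t ∈ T, t.1 = lo) (hwh : ∃ t ∈ T, t.1 = hi)
    (hle : ∀ t ∈ T, q.2 ≤ t.2) (hJq : pvJ ≤ q.2) :
    pvArea c lo hi (T ++ [q]) = pvArea c lo hi T := by
  unfold pvArea
  refine Finset.sum_congr rfl fun x hx => ?_
  rw [Finset.mem_Icc] at hx
  obtain ⟨tl, htl, htl1⟩ := hwl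
  obtain ⟨th, hth, hth1⟩ := hwh
  by_cases hxc : x ≤ c
  · rw [if_pos hxc, if_pos hxc, pvLm_append _ _ _ hJq]
    split_ifs with h
    · exact pvLm_absorb htl (by omega) (hle tl htl)
    · rfl
  · rw [if_neg hxc, if_neg hxc, pvRm_append _ _ _ hJq]
    split_ifs with h
    · exact pvRm_absorb hth (by omega) (hle th hth)
    · rfl

-- a pillar beyond the right end extends the roof at its own height
lemma pvArea_right {T : List (Int × Int)} {q : Int × Int} {c lo hi : Int}
    (hwl : ∃ t ∈ T, t.1 = lo) (hwh : ∃ t ∈ T, t.1 = hi)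
    (hbd : ∀ t ∈ T, t.1 ≤ hi)
    (hle : ∀ t ∈ T, q.2 ≤ t.2) (hc : lo ≤ c ∧ c ≤ hi)
    (hgt : hi < q.1) (hJ : pvJ < q.2) :
    pvArea c lo q.1 (T ++ [q]) = pvArea c lo hi T + (q.1 - hi) * q.2 := by
  unfold pvArea
  rw [pvSum_splitIoc _ (le_trans hc.1 hc.2) (le_of_lt hgt)]
  congr 1
  · refine Finset.sum_congr rfl fun x hx => ?_
    rw [Finset.mem_Icc] at hx
    obtain ⟨tl, htl, htl1⟩ := hwl
    obtain ⟨th, hth, hth1⟩ := hwh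
    by_cases hxc : x ≤ c
    · rw [if_pos hxc, if_pos hxc, pvLm_append _ _ _ (le_of_lt hJ), if_neg (by omega)]
    · rw [if_neg hxc, if_neg hxc, pvRm_append _ _ _ (le_of_lt hJ), if_pos (by omega)]
      exact pvRm_absorb hth (by omega) (hle th hth)
  · rw [← pvSum_constIoc q.2 (le_of_lt hgt)]
    refine Finset.sum_congr rfl fun x hx => ?_
    rw [Finset.mem_Ioc] at hx
    rw [if_neg (by omega), pvRm_append _ _ _ (le_of_lt hJ), if_pos (by omega)]
    rw [pvRm_empty (fun t ht => by have := hbd t ht; omega)]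
    exact max_eq_right (le_of_lt hJ)

-- a pillar beyond the left end, symmetrically
lemma pvArea_left {T : List (Int × Int)} {q : Int × Int} {c lo hi : Int}
    (hwl : ∃ t ∈ T, t.1 = lo) (hwh : ∃ t ∈ T, t.1 = hi)
    (hbd : ∀ t ∈ T, lo ≤ t.1)
    (hle : ∀ t ∈ T, q.2 ≤ t.2) (hc : lo ≤ c ∧ c ≤ hi)
    (hlt : q.1 < lo) (hJ : pvJ < q.2) :
    pvArea c q.1 hi (T ++ [q]) = pvArea c lo hi T + (lo - q.1) * q.2 := by
  unfold pvArea
  rw [pvSum_splitIco _ (le_of_lt hlt) (le_trans hc.1 hc.2), add_comm]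
  congr 1
  · refine Finset.sum_congr rfl fun x hx => ?_
    rw [Finset.mem_Icc] at hx
    obtain ⟨tl, htl, htl1⟩ := hwl
    obtain ⟨th, hth, hth1⟩ := hwh
    by_cases hxc : x ≤ c
    · rw [if_pos hxc, if_pos hxc, pvLm_append _ _ _ (le_of_lt hJ), if_pos (by omega)]
      exact pvLm_absorb htl (by omega) (hle tl htl)
    · rw [if_neg hxc, if_neg hxc, pvRm_append _ _ _ (le_of_lt hJ), if_neg (by omega)]
  · rw [← pvSum_constIco q.2 (le_of_lt hlt)]
    refine Finset.sum_congr rfl fun x hx => ?_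
    rw [Finset.mem_Ico] at hx
    rw [if_pos (by omega), pvLm_append _ _ _ (le_of_lt hJ), if_pos (by omega)]
    rw [pvLm_empty (fun t ht => by have := hbd t ht; omega)]
    exact max_eq_right (le_of_lt hJ)

-- ===== A's loop invariant =====
lemma pvLoopA_inv (rest : List (Int × Int)) :
    ∀ (T : List (Int × Int)) (c : Int × Int) (lo hi : Int),
    (∃ t ∈ T, t.1 = lo) → (∃ t ∈ T, t.1 = hi) →
    (∀ t ∈ T, lo ≤ t.1 ∧ t.1 ≤ hi) →
    (lo ≤ c.1 ∧ c.1 ≤ hi) →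
    (∀ q ∈ rest, ∀ t ∈ T, q.2 ≤ t.2) →
    rest.Pairwise (fun a b => b.2 ≤ a.2) →
    (∀ q ∈ rest, pvJ < q.2) →
    ∃ lo' hi',
      rest.foldl pvStepA (hi, lo, pvArea c.1 lo hi T) = (hi', lo', pvArea c.1 lo' hi' (T ++ rest)) ∧
      (∃ t ∈ T ++ rest, t.1 = lo') ∧ (∃ t ∈ T ++ rest, t.1 = hi') ∧
      (∀ t ∈ T ++ rest, lo' ≤ t.1 ∧ t.1 ≤ hi') := by
  induction rest with
  | nil =>
    intro T c lo hi hwl hwh hbd _ _ _ _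
    exact ⟨lo, hi, by simp, by simpa using hwl, by simpa using hwh, by simpa using hbd⟩
  | cons q rest ih =>
    intro T c lo hi hwl hwh hbd hc hle hsort hJ
    have hlohi : lo ≤ hi := le_trans hc.1 hc.2
    have hqT : ∀ t ∈ T, q.2 ≤ t.2 := fun t ht => hle q List.mem_cons_self t ht
    have hJq : pvJ < q.2 := hJ q List.mem_cons_self
    have hsort' := (List.pairwise_cons.mp hsort).2
    have hqrest := (List.pairwise_cons.mp hsort).1
    have hTq_assoc : (T ++ [q]) ++ rest = T ++ q :: rest := by simp
    rw [List.foldl_cons]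
    by_cases h1 : q.1 > hi
    · have hstep : pvStepA (hi, lo, pvArea c.1 lo hi T) q
          = (q.1, lo, pvArea c.1 lo hi T + (q.1 - hi) * q.2) := by
        unfold pvStepA
        simp only [if_pos h1, if_neg (show ¬ q.1 < lo by omega)]
        simp [abs_of_nonneg (show (0:Int) ≤ q.1 - hi by omega)]
      rw [hstep, ← pvArea_right hwl hwh (fun t ht => (hbd t ht).2) hqT hc h1 hJq]
      obtain ⟨lo', hi', heq, hp1, hp2, hp3⟩ := ih (T ++ [q]) c lo q.1
        (by obtain ⟨t, ht, h⟩ := hwl; exact ⟨t, List.mem_append_left _ ht, h⟩)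
        (⟨q, List.mem_append_right _ List.mem_cons_self, rfl⟩)
        (by
          intro t ht
          rcases List.mem_append.mp ht with h | h
          · have := hbd t h; omega
          · simp at h; subst h; omega)
        (⟨hc.1, by omega⟩)
        (by
          intro q' hq' t ht
          rcases List.mem_append.mp ht with h | h
          · exact hle q' (List.mem_cons_of_mem _ hq') t h
          · simp at h; subst h; exact hqrest q' hq')
        hsort'
        (fun q' hq' => hJ q' (List.mem_cons_of_mem _ hq'))
      rw [hTq_assoc] at heq hp1 hp2 hp3
      exact ⟨lo', hi', heq, hp1, hp2, hp3⟩
    · by_cases h2 : q.1 < lo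
      · have hstep : pvStepA (hi, lo, pvArea c.1 lo hi T) q
            = (hi, q.1, pvArea c.1 lo hi T + (lo - q.1) * q.2) := by
          unfold pvStepA
          simp only [if_neg h1, if_pos h2]
          simp [abs_of_nonpos (show q.1 - lo ≤ (0:Int) by omega)]
        rw [hstep, ← pvArea_left hwl hwh (fun t ht => (hbd t ht).1) hqT hc h2 hJq]
        obtain ⟨lo', hi', heq, hp1, hp2, hp3⟩ := ih (T ++ [q]) c q.1 hi
          (⟨q, List.mem_append_right _ List.mem_cons_self, rfl⟩)
          (by obtain ⟨t, ht, h⟩ := hwh; exact ⟨t, List.mem_append_left _ ht, h⟩)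
          (by
            intro t ht
            rcases List.mem_append.mp ht with h | h
            · have := hbd t h; omega
            · simp at h; subst h; omega)
          (⟨by omega, hc.2⟩)
          (by
            intro q' hq' t ht
            rcases List.mem_append.mp ht with h | h
            · exact hle q' (List.mem_cons_of_mem _ hq') t h
            · simp at h; subst h; exact hqrest q' hq')
          hsort'
          (fun q' hq' => hJ q' (List.mem_cons_of_mem _ hq'))
        rw [hTq_assoc] at heq hp1 hp2 hp3
        exact ⟨lo', hi', heq, hp1, hp2, hp3⟩
      · have hstep : pvStepA (hi, lo, pvArea c.1 lo hi T) q
            = (hi, lo, pvArea c.1 lo hi T) := by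
          unfold pvStepA
          simp only [if_neg h1, if_neg h2]
        rw [hstep, ← pvArea_inside hwl hwh hqT (le_of_lt hJq)]
        obtain ⟨lo', hi', heq, hp1, hp2, hp3⟩ := ih (T ++ [q]) c lo hi
          (by obtain ⟨t, ht, h⟩ := hwl; exact ⟨t, List.mem_append_left _ ht, h⟩)
          (by obtain ⟨t, ht, h⟩ := hwh; exact ⟨t, List.mem_append_left _ ht, h⟩)
          (by
            intro t ht
            rcases List.mem_append.mp ht with h | h
            · exact hbd t h
            · simp at h; subst h; omega)
          hc
          (by
            intro q' hq' t ht
            rcases List.mem_append.mp ht with h | h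
            · exact hle q' (List.mem_cons_of_mem _ hq') t h
            · simp at h; subst h; exact hqrest q' hq')
          hsort'
          (fun q' hq' => hJ q' (List.mem_cons_of_mem _ hq'))
        rw [hTq_assoc] at heq hp1 hp2 hp3
        exact ⟨lo', hi', heq, hp1, hp2, hp3⟩

-- A's value is the reference area at the tallest-first center
lemma pvA_char (N : Int) (data : List (Int × Int)) (hne : data ≠ [])
    (hJ : ∀ q ∈ data, pvJ < q.2) :
    ∃ (c : Int × Int) (lo hi : Int),
      c ∈ data ∧ (∀ t ∈ data, t.2 ≤ c.2) ∧
      (∃ t ∈ data, t.1 = lo) ∧ (∃ t ∈ data, t.1 = hi) ∧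
      (∀ t ∈ data, lo ≤ t.1 ∧ t.1 ≤ hi) ∧
      solution N data = pvArea c.1 lo hi data := by
  rcases hsd : PySem.List.sorted data (fun x => -x.2) with _ | ⟨c, rest⟩
  · exact absurd ((PySem.List.sorted_eq_nil_iff _ _ _).mp hsd) hne
  have hperm : (c :: rest).Perm data := hsd ▸ PySem.List.sorted_perm data (fun x => -x.2) false
  have hpw := PySem.List.sorted_pairwise data (fun x => -x.2)
  rw [hsd] at hpw
  have hcr : ∀ b ∈ rest, b.2 ≤ c.2 := fun b hb => by
    have := (List.pairwise_cons.mp hpw).1 b hb; omega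
  have hrest : rest.Pairwise (fun a b => b.2 ≤ a.2) :=
    ((List.pairwise_cons.mp hpw).2).imp (fun h => by omega)
  have hJc : pvJ < c.2 := hJ c (hperm.mem_iff.mp List.mem_cons_self)
  have hinit : pvArea c.1 c.1 c.1 [c] = c.2 := by
    unfold pvArea
    rw [Finset.Icc_self, Finset.sum_singleton, if_pos (le_refl c.1)]
    unfold pvLm
    rw [List.filter_cons, if_pos (by simp)]
    simp [pvF_cons, pvF_nil, max_eq_left (le_of_lt hJc)]
  obtain ⟨lo', hi', heq, hp1, hp2, hp3⟩ := pvLoopA_inv rest [c] c c.1 c.1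
    ⟨c, List.mem_cons_self, rfl⟩ ⟨c, List.mem_cons_self, rfl⟩
    (by intro t ht; simp at ht; subst ht; omega)
    ⟨le_refl _, le_refl _⟩
    (by intro q hq t ht; simp at ht; subst ht; exact hcr q hq)
    hrest
    (fun q hq => hJ q (hperm.mem_iff.mp (List.mem_cons_of_mem _ hq)))
  have hlist : ([c] ++ rest) = c :: rest := by simp
  rw [hlist] at heq hp1 hp2 hp3
  refine ⟨c, lo', hi', hperm.mem_iff.mp List.mem_cons_self, ?_, ?_, ?_, ?_, ?_⟩
  · intro t ht
    rcases List.mem_cons.mp (hperm.mem_iff.mpr ht) with rfl | h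
    · exact le_refl _
    · exact hcr t h
  · obtain ⟨t, ht, h⟩ := hp1; exact ⟨t, hperm.mem_iff.mp ht, h⟩
  · obtain ⟨t, ht, h⟩ := hp2; exact ⟨t, hperm.mem_iff.mp ht, h⟩
  · intro t ht; exact hp3 t (hperm.mem_iff.mpr ht)
  · show solution N data = _
    unfold solution
    rw [hsd]
    show (List.foldl pvStepA (c.1, c.1, c.2) rest).2.2 = _
    rw [← hinit, heq]
    exact pvArea_perm hperm _ _ _

-- ===== B-side lemmas =====

def pvLast : List (Int × Int) → (Int × Int) → (Int × Int)
  | [], d => d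
  | a :: t, _ => pvLast t a

lemma pvLast_mem : ∀ (l : List (Int × Int)) (d : Int × Int), l ≠ [] → pvLast l d ∈ l := by
  intro l
  induction l with
  | nil => intro d h; exact absurd rfl h
  | cons a t ih =>
    intro d _
    cases t with
    | nil => simp [pvLast]
    | cons b t' => exact List.mem_cons_of_mem _ (ih a (by simp))

lemma pvLast_concat : ∀ (l : List (Int × Int)) (z d : Int × Int), pvLast (l ++ [z]) d = z := by
  intro l
  induction l with
  | nil => intro z d; rfl
  | cons a t ih => intro z d; simpa [pvLast] using ih z a

lemma pvSum_splitIcoIco (f : Int → Int) {a b c : Int} (h1 : a ≤ b) (h2 : b ≤ c) :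
    ∑ x ∈ Finset.Ico a c, f x = (∑ x ∈ Finset.Ico a b, f x) + ∑ x ∈ Finset.Ico b c, f x := by
  rw [← Finset.Ico_union_Ico_eq_Ico h1 h2, Finset.sum_union (by
    rw [Finset.disjoint_left]; intro x hx hy
    simp only [Finset.mem_Ico] at hx hy; omega)]

-- the sweep computes the half-open-column sum of the running-max roof
lemma pvSweepGo_eq : ∀ (t : List (Int × Int)) (a : Int × Int) (run : Int),
    (a :: t).Pairwise (fun p q => p.1 ≤ q.1) →
    (∀ q ∈ a :: t, pvJ < q.2) →
    pvSweepGo run (a :: t)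
      = ∑ x ∈ Finset.Ico a.1 (pvLast t a).1, max run (pvLm (a :: t) x) := by
  intro t
  induction t with
  | nil =>
    intro a run _ _
    simp [pvSweepGo, pvLast]
  | cons b t' ih =>
    intro a run hpw hJ
    have hab : a.1 ≤ b.1 := (List.pairwise_cons.mp hpw).1 b List.mem_cons_self
    have hpw' : (b :: t').Pairwise (fun p q => p.1 ≤ q.1) := (List.pairwise_cons.mp hpw).2
    have hJ' : ∀ q ∈ b :: t', pvJ < q.2 := fun q hq => hJ q (List.mem_cons_of_mem _ hq)
    have hJa : pvJ < a.2 := hJ a List.mem_cons_self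
    have hmem : pvLast t' b ∈ b :: t' := by
      cases t' with
      | nil => simp [pvLast]
      | cons u v => exact List.mem_cons_of_mem _ (pvLast_mem _ _ (by simp))
    have hble : b.1 ≤ (pvLast t' b).1 := by
      rcases List.mem_cons.mp hmem with h | h
      · rw [h]
      · exact (List.pairwise_cons.mp hpw').1 _ h
    show (b.1 - a.1) * (max run a.2) + pvSweepGo (max run a.2) (b :: t')
        = ∑ x ∈ Finset.Ico a.1 (pvLast t' b).1, max run (pvLm (a :: b :: t') x)
    rw [pvSum_splitIcoIco _ hab hble]
    congr 1
    · rw [← pvSum_constIco (max run a.2) hab]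
      refine Finset.sum_congr rfl fun x hx => ?_
      rw [Finset.mem_Ico] at hx
      rw [pvLm_cons, if_pos (by omega : a.1 ≤ x),
        pvLm_empty (T := b :: t') (fun q hq => by
          rcases List.mem_cons.mp hq with rfl | h
          · omega
          · have := (List.pairwise_cons.mp hpw').1 q h; omega)]
      rw [max_eq_left (le_of_lt hJa), max_comm]
    · rw [ih b (max run a.2) hpw' hJ']
      refine Finset.sum_congr rfl fun x hx => ?_
      rw [Finset.mem_Ico] at hx
      rw [pvLm_cons (a := a), if_pos (by omega : a.1 ≤ x), max_assoc]

-- the height-max loop of Source B is a running max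
lemma pvFoldMax_eq (l : List (Int × Int)) : ∀ (m0 : Int),
    l.foldl (fun m q => if q.2 > m then q.2 else m) m0 = l.foldl (fun m q => max m q.2) m0 := by
  induction l with
  | nil => intro m0; rfl
  | cons a t ih =>
    intro m0
    simp only [List.foldl_cons]
    rw [show (if a.2 > m0 then a.2 else m0) = max m0 a.2 by split <;> omega]
    exact ih _

lemma pvFoldMax_ub (l : List (Int × Int)) : ∀ (m0 : Int),
    m0 ≤ l.foldl (fun m q => max m q.2) m0 ∧ ∀ q ∈ l, q.2 ≤ l.foldl (fun m q => max m q.2) m0 := by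
  induction l with
  | nil => intro m0; exact ⟨le_refl _, by simp⟩
  | cons a t ih =>
    intro m0
    simp only [List.foldl_cons]
    obtain ⟨h1, h2⟩ := ih (max m0 a.2)
    refine ⟨le_trans (le_max_left _ _) h1, ?_⟩
    intro q hq
    rcases List.mem_cons.mp hq with rfl | h
    · exact le_trans (le_max_right _ _) h1
    · exact h2 q h

lemma pvFoldMax_mem (l : List (Int × Int)) : ∀ (m0 : Int),
    l.foldl (fun m q => max m q.2) m0 = m0 ∨ ∃ q ∈ l, l.foldl (fun m q => max m q.2) m0 = q.2 := by
  induction l with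
  | nil => intro m0; exact Or.inl rfl
  | cons a t ih =>
    intro m0
    simp only [List.foldl_cons]
    rcases ih (max m0 a.2) with h | ⟨q, hq, h⟩
    · rcases max_choice m0 a.2 with hm | hm
      · exact Or.inl (by rw [h, hm])
      · exact Or.inr ⟨a, List.mem_cons_self, by rw [h, hm]⟩
    · exact Or.inr ⟨q, List.mem_cons_of_mem _ hq, h⟩

-- the while-loop split of Source B: prefix before the first pillar of height h, and the rest
lemma pvSplit_spec : ∀ (l : List (Int × Int)) (h : Int), (∃ q ∈ l, q.2 = h) →
    ∃ L pk R, l = L ++ pk :: R ∧ pvSplit h l = (L ++ [pk], pk :: R) ∧ pk.2 = h ∧ ∀ q ∈ L, q.2 ≠ h := by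
  intro l
  induction l with
  | nil => intro h hex; obtain ⟨q, hq, _⟩ := hex; cases hq
  | cons q t ih =>
    intro h hex
    by_cases hq : q.2 = h
    · exact ⟨[], q, t, by simp, by simp [pvSplit, hq], hq, by simp⟩
    · have hex' : ∃ q' ∈ t, q'.2 = h := by
        obtain ⟨q', hq', he⟩ := hex
        rcases List.mem_cons.mp hq' with rfl | hmem
        · exact absurd he hq
        · exact ⟨q', hmem, he⟩
      obtain ⟨L, pk, R, he1, he2, he3, he4⟩ := ih h hex'
      refine ⟨q :: L, pk, R, by simp [he1], ?_, he3, ?_⟩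
      · simp only [pvSplit]
        rw [he2, if_neg (show ¬((q.2 == h) = true) by simp [hq])]
        simp
      · intro q' hq'
        rcases List.mem_cons.mp hq' with rfl | hmem
        · exact hq
        · exact he4 q' hmem

-- pillars strictly beyond x on the right do not change Lm; strictly before, Rm
lemma pvLm_ext_right {T R : List (Int × Int)} {x : Int} (h : ∀ q ∈ R, x < q.1) :
    pvLm (T ++ R) x = pvLm T x := by
  unfold pvLm
  rw [List.filter_append, (List.filter_eq_nil_iff (l := R)).mpr (fun q hq => by simpa using not_le.mpr (h q hq)),
    List.append_nil]

lemma pvRm_ext_left {L T : List (Int × Int)} {x : Int} (h : ∀ q ∈ L, q.1 < x) :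
    pvRm (L ++ T) x = pvRm T x := by
  unfold pvRm
  rw [List.filter_append, (List.filter_eq_nil_iff (l := L)).mpr (fun q hq => by simpa using not_le.mpr (h q hq)),
    List.nil_append]

-- the mirrored right part turns Rm into Lm
lemma pvLm_mirror (l : List (Int × Int)) (y : Int) :
    pvLm (l.reverse.map (fun q => (-q.1, q.2))) y = pvRm l (-y) := by
  unfold pvLm pvRm
  rw [List.filter_map]
  have hpred : ((fun q : Int × Int => decide (q.1 ≤ y)) ∘ (fun q : Int × Int => (-q.1, q.2)))
      = fun q : Int × Int => decide (-y ≤ q.1) := by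
    funext q
    simp only [Function.comp_apply]
    exact decide_eq_decide.mpr (by omega)
  rw [hpred, List.map_map]
  have hsnd : (Prod.snd ∘ fun q : Int × Int => (-q.1, q.2)) = Prod.snd := by
    funext q; rfl
  rw [hsnd, List.filter_reverse, List.map_reverse]
  exact pvF_perm (List.reverse_perm _)

lemma pvSum_reflect (g : Int → Int) (a b : Int) :
    ∑ x ∈ Finset.Ico a b, g (-x) = ∑ y ∈ Finset.Ioc (-b) (-a), g y := by
  refine Finset.sum_nbij' (i := fun x => -x) (j := fun y => -y) ?_ ?_ ?_ ?_ ?_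
  · intro x hx; rw [Finset.mem_Ico] at hx; rw [Finset.mem_Ioc]; dsimp only; omega
  · intro y hy; rw [Finset.mem_Ioc] at hy; rw [Finset.mem_Ico]; dsimp only; omega
  · intro x _; dsimp only; omega
  · intro y _; dsimp only; omega
  · intro x _; rfl

-- B's value is the reference area at the first-tallest position
-- tallest-pillar value of Lm / Rm
lemma pvLm_tall {T : List (Int × Int)} {c : Int × Int} {x : Int}
    (hc : c ∈ T) (hx : c.1 ≤ x) (htall : ∀ t ∈ T, t.2 ≤ c.2) (hJ : pvJ < c.2) :
    pvLm T x = c.2 := by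
  refine le_antisymm (pvF_le (le_of_lt hJ) ?_) ?_
  · intro h2 hh
    obtain ⟨q, hq, rfl⟩ := List.mem_map.mp hh
    exact htall q (List.mem_filter.mp hq).1
  · exact pvF_le_of_mem (List.mem_map_of_mem (List.mem_filter.mpr ⟨hc, by simpa using hx⟩))

lemma pvRm_tall {T : List (Int × Int)} {c : Int × Int} {x : Int}
    (hc : c ∈ T) (hx : x ≤ c.1) (htall : ∀ t ∈ T, t.2 ≤ c.2) (hJ : pvJ < c.2) :
    pvRm T x = c.2 := by
  refine le_antisymm (pvF_le (le_of_lt hJ) ?_) ?_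
  · intro h2 hh
    obtain ⟨q, hq, rfl⟩ := List.mem_map.mp hh
    exact htall q (List.mem_filter.mp hq).1
  · exact pvF_le_of_mem (List.mem_map_of_mem (List.mem_filter.mpr ⟨hc, by simpa using hx⟩))

lemma pvB_char (N : Int) (data : List (Int × Int)) (hne : data ≠ [])
    (hJ : ∀ q ∈ data, pvJ < q.2) :
    ∃ (c : Int × Int) (lo hi : Int),
      c ∈ data ∧ (∀ t ∈ data, t.2 ≤ c.2) ∧
      (∃ t ∈ data, t.1 = lo) ∧ (∃ t ∈ data, t.1 = hi) ∧
      (∀ t ∈ data, lo ≤ t.1 ∧ t.1 ≤ hi) ∧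
      solution_alt N data = pvArea c.1 lo hi data := by
  rcases hxs : PySem.List.sorted data (fun t => t.1) with _ | ⟨a, t⟩
  · exact absurd ((PySem.List.sorted_eq_nil_iff _ _ _).mp hxs) hne
  have hperm : (a :: t).Perm data := hxs ▸ PySem.List.sorted_perm data (fun t => t.1) false
  have hpw : (a :: t).Pairwise (fun p q => p.1 ≤ q.1) := by
    have h := PySem.List.sorted_pairwise data (fun t => t.1); rwa [hxs] at h
  have hJx : ∀ q ∈ a :: t, pvJ < q.2 := fun q hq => hJ q (hperm.mem_iff.mp hq)
  have hahead : ∀ q ∈ a :: t, a.1 ≤ q.1 := by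
    intro q hq
    rcases List.mem_cons.mp hq with rfl | h
    · exact le_refl _
    · exact (List.pairwise_cons.mp hpw).1 q h
  -- the height maximum computed by Source B's first loop
  set M := (a :: t).foldl (fun m q => if q.2 > m then q.2 else m) a.2 with hM
  have hMeq : M = (a :: t).foldl (fun m q => max m q.2) a.2 := pvFoldMax_eq _ _
  have hub : ∀ q ∈ a :: t, q.2 ≤ M := by rw [hMeq]; exact fun q hq => (pvFoldMax_ub _ _).2 q hq
  have hexM : ∃ q ∈ a :: t, q.2 = M := by
    rw [hMeq]
    rcases pvFoldMax_mem (a :: t) a.2 with h | ⟨q, hq, h⟩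
    · exact ⟨a, List.mem_cons_self, h.symm⟩
    · exact ⟨q, hq, h.symm⟩
  obtain ⟨L, pk, R, hsplit_eq, hsplit_val, hpk2, hLne⟩ := pvSplit_spec (a :: t) M hexM
  have hxs_assoc : (a :: t) = (L ++ [pk]) ++ R := by rw [hsplit_eq]; simp
  have hpk_mem : pk ∈ a :: t := by rw [hsplit_eq]; exact List.mem_append_right _ List.mem_cons_self
  have hJpk : pvJ < pk.2 := hJx pk hpk_mem
  have hpwfull : (L ++ pk :: R).Pairwise (fun p q => p.1 ≤ q.1) := hsplit_eq ▸ hpw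
  have hLle : ∀ q ∈ L, ∀ r ∈ pk :: R, q.1 ≤ r.1 :=
    fun q hq r hr => (List.pairwise_append.mp hpwfull).2.2 q hq r hr
  have hpwLP : (L ++ [pk]).Pairwise (fun p q => p.1 ≤ q.1) :=
    List.Pairwise.sublist ((List.append_sublist_append_left L).mpr (by simp)) hpwfull
  have hpwRP : (pk :: R).Pairwise (fun p q => p.1 ≤ q.1) :=
    List.Pairwise.sublist (List.sublist_append_right L _) hpwfull
  have hRge : ∀ q ∈ pk :: R, pk.1 ≤ q.1 := by
    intro q hq
    rcases List.mem_cons.mp hq with rfl | h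
    · exact le_refl _
    · exact (List.pairwise_cons.mp hpwRP).1 q h
  have hLPsub : ∀ q ∈ L ++ [pk], q ∈ a :: t := by
    intro q hq; rw [hxs_assoc]; exact List.mem_append_left _ hq
  have hRPsub : ∀ q ∈ pk :: R, q ∈ a :: t := by
    intro q hq; rw [hsplit_eq]; exact List.mem_append_right _ hq
  have hapk : a.1 ≤ pk.1 := hahead pk hpk_mem
  -- the left part starts at a
  obtain ⟨LP', hLP⟩ : ∃ LP', L ++ [pk] = a :: LP' := by
    cases L with
    | nil =>
      have : pk = a := by simpa using congrArg (fun l => l.head?) hsplit_eq.symm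
      exact ⟨[], by simp [this]⟩
    | cons l0 L' =>
      have : l0 = a := by simpa using congrArg (fun l => l.head?) hsplit_eq.symm
      exact ⟨L' ++ [pk], by simp [this]⟩
  -- left sweep value
  have hsweepL : pvSweep (L ++ [pk]) = ∑ x ∈ Finset.Ico a.1 pk.1, pvLm (a :: t) x := by
    have hlastL : pvLast LP' a = pk := by
      have h1 := pvLast_concat L pk a
      rw [hLP] at h1
      simpa [pvLast] using h1
    rw [hLP]
    show pvSweepGo a.2 (a :: LP') = _
    rw [pvSweepGo_eq LP' a a.2 (hLP ▸ hpwLP) (fun q hq => hJx q (hLPsub q (hLP ▸ hq))), hlastL]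
    refine Finset.sum_congr rfl fun x hx => ?_
    rw [Finset.mem_Ico] at hx
    rw [max_comm, pvLm_absorb (T := a :: LP') List.mem_cons_self hx.1 (le_refl a.2)]
    rw [← hLP, hxs_assoc]
    exact (pvLm_ext_right (fun q hq => by
      have := hRge q (List.mem_cons_of_mem _ hq); omega)).symm
  -- the mirrored right part
  rcases hMR : (pk :: R).reverse.map (fun q => (-q.1, q.2)) with _ | ⟨m, mt⟩
  · have := congrArg List.length hMR; simp at this
  have hMRsub : ∀ q ∈ m :: mt, ∃ w ∈ pk :: R, (-w.1, w.2) = q := by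
    intro q hq
    rw [← hMR] at hq
    obtain ⟨w, hw, hwq⟩ := List.mem_map.mp hq
    exact ⟨w, List.mem_reverse.mp hw, hwq⟩
  have hpwMR : (m :: mt).Pairwise (fun p q : Int × Int => p.1 ≤ q.1) := by
    rw [← hMR, List.pairwise_map, List.pairwise_reverse]
    exact hpwRP.imp (fun h => by dsimp only; omega)
  have hJMR : ∀ q ∈ m :: mt, pvJ < q.2 := by
    intro q hq
    obtain ⟨w, hw, hwq⟩ := hMRsub q hq
    rw [← hwq]
    exact hJx w (hRPsub w hw)
  have hble_all : ∀ q ∈ pk :: R, q.1 ≤ -m.1 := by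
    intro q hq
    have hfq : (-q.1, q.2) ∈ m :: mt := by
      rw [← hMR]
      exact List.mem_map_of_mem (List.mem_reverse.mpr hq)
    rcases List.mem_cons.mp hfq with h | h
    · have : -q.1 = m.1 := congrArg Prod.fst h.symm ▸ rfl
      omega
    · have := (List.pairwise_cons.mp hpwMR).1 _ h
      simp only at this
      omega
  have hpkm : pk.1 ≤ -m.1 := hble_all pk List.mem_cons_self
  have hlastMR : pvLast mt m = (-pk.1, pk.2) := by
    have h1 : pvLast ((pk :: R).reverse.map (fun q => (-q.1, q.2))) m = (-pk.1, pk.2) := by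
      rw [List.reverse_cons, List.map_append]
      exact pvLast_concat _ _ _
    rw [hMR] at h1
    simpa [pvLast] using h1
  -- right sweep value
  have hsweepR : pvSweep ((pk :: R).reverse.map (fun q => (-q.1, q.2)))
      = ∑ y ∈ Finset.Ioc pk.1 (-m.1), pvRm (a :: t) y := by
    rw [hMR]
    show pvSweepGo m.2 (m :: mt) = _
    rw [pvSweepGo_eq mt m m.2 hpwMR hJMR, hlastMR]
    have hstep1 : ∑ x ∈ Finset.Ico m.1 (-pk.1), max m.2 (pvLm (m :: mt) x)
        = ∑ x ∈ Finset.Ico m.1 (-pk.1), pvRm (pk :: R) (-x) := by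
      refine Finset.sum_congr rfl fun x hx => ?_
      rw [Finset.mem_Ico] at hx
      rw [max_comm, pvLm_absorb (T := m :: mt) List.mem_cons_self hx.1 (le_refl m.2)]
      rw [← hMR, pvLm_mirror]
    rw [hstep1, pvSum_reflect (pvRm (pk :: R)) m.1 (-pk.1), neg_neg]
    refine Finset.sum_congr rfl fun y hy => ?_
    rw [Finset.mem_Ioc] at hy
    rw [hsplit_eq]
    exact (pvRm_ext_left (fun q hq => by
      have := hLle q hq pk List.mem_cons_self; omega)).symm
  -- the tallest column
  have htallx : ∀ q ∈ a :: t, q.2 ≤ pk.2 := fun q hq => hpk2 ▸ hub q hq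
  have hcol : pvLm (a :: t) pk.1 = pk.2 := pvLm_tall hpk_mem (le_refl _) htallx hJpk
  -- assemble B's value
  have hB : solution_alt N data = pvArea pk.1 a.1 (-m.1) (a :: t) := by
    unfold solution_alt
    rw [hxs]
    show M + pvSweep (pvSplit M (a :: t)).1 + pvSweep ((pvSplit M (a :: t)).2.reverse.map _) = _
    rw [hsplit_val]
    unfold pvArea
    rw [pvSum_split _ hapk hpkm, if_pos (le_refl pk.1), hcol]
    have hL : pvSweep (L ++ [pk]) = ∑ x ∈ Finset.Ico a.1 pk.1,
        (if x ≤ pk.1 then pvLm (a :: t) x else pvRm (a :: t) x) := by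
      rw [hsweepL]
      refine Finset.sum_congr rfl fun x hx => ?_
      rw [Finset.mem_Ico] at hx
      rw [if_pos (by omega)]
    have hR : pvSweep ((pk :: R).reverse.map (fun q => (-q.1, q.2)))
        = ∑ y ∈ Finset.Ioc pk.1 (-m.1),
        (if y ≤ pk.1 then pvLm (a :: t) y else pvRm (a :: t) y) := by
      rw [hsweepR]
      refine Finset.sum_congr rfl fun y hy => ?_
      rw [Finset.mem_Ioc] at hy
      rw [if_neg (by omega)]
    rw [hL, hR, hpk2]
    ring
  -- package the existentials
  obtain ⟨w, hw, hwm⟩ := hMRsub m List.mem_cons_self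
  have hwx : w ∈ a :: t := hRPsub w hw
  refine ⟨pk, a.1, -m.1, hperm.mem_iff.mp hpk_mem, ?_, ?_, ?_, ?_, ?_⟩
  · exact fun q hq => htallx q (hperm.mem_iff.mpr hq)
  · exact ⟨a, hperm.mem_iff.mp List.mem_cons_self, rfl⟩
  · refine ⟨w, hperm.mem_iff.mp hwx, ?_⟩
    have : -w.1 = m.1 := congrArg Prod.fst hwm ▸ rfl
    omega
  · intro q hq
    have hqx := hperm.mem_iff.mpr hq
    refine ⟨hahead q hqx, ?_⟩
    rw [hsplit_eq] at hqx
    rcases List.mem_append.mp hqx with h | h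
    · have := hLle q h pk List.mem_cons_self; omega
    · exact hble_all q h
  · rw [hB]
    exact pvArea_perm hperm _ _ _

lemma pvArea_center_le {T : List (Int × Int)} {c c' : Int × Int} {lo hi : Int}
    (hcc : c.1 ≤ c'.1) (hc : c ∈ T) (hc' : c' ∈ T)
    (htall : ∀ t ∈ T, t.2 ≤ c.2) (htall' : ∀ t ∈ T, t.2 ≤ c'.2)
    (hJ : ∀ q ∈ T, pvJ < q.2) :
    pvArea c.1 lo hi T = pvArea c'.1 lo hi T := by
  unfold pvArea
  refine Finset.sum_congr rfl fun x _ => ?_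
  by_cases h1 : x ≤ c.1
  · rw [if_pos h1, if_pos (by omega)]
  · by_cases h2 : x ≤ c'.1
    · rw [if_neg h1, if_pos h2]
      rw [pvRm_tall hc' h2 htall' (hJ c' hc'), pvLm_tall hc (by omega) htall (hJ c hc)]
      exact le_antisymm (htall c' hc') (htall' c hc)
    · rw [if_neg h1, if_neg h2]

-- the reference area does not depend on which tallest pillar is the center
lemma pvArea_center {T : List (Int × Int)} {c c' : Int × Int} {lo hi : Int}
    (hc : c ∈ T) (hc' : c' ∈ T)
    (htall : ∀ t ∈ T, t.2 ≤ c.2) (htall' : ∀ t ∈ T, t.2 ≤ c'.2)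
    (hJ : ∀ q ∈ T, pvJ < q.2) :
    pvArea c.1 lo hi T = pvArea c'.1 lo hi T := by
  rcases le_total c.1 c'.1 with h | h
  · exact pvArea_center_le h hc hc' htall htall' hJ
  · exact (pvArea_center_le h hc' hc htall' htall hJ).symm

-- ===== VERDICT (by name: the statement is the Claim_ definition above) =====
theorem solution_spec : Claim_equal_solution := by
  intro N data hDom hPre
  unfold Spec_solution
  have hJ : ∀ q ∈ data, pvJ < q.2 := by
    intro q hq
    unfold Dom_solution at hDom
    simp [List.all_eq_true, pvDomInt] at hDom
    have := (hDom.2 q.1 q.2 hq).2.1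
    unfold pvJ
    omega
  obtain ⟨c, lo, hi, hcmem, htall, hwl, hwh, hbd, hA⟩ := pvA_char N data hPre hJ
  obtain ⟨c', lo', hi', hcmem', htall', hwl', hwh', hbd', hB⟩ := pvB_char N data hPre hJ
  have hlo : lo = lo' := by
    obtain ⟨t, ht, hteq⟩ := hwl
    obtain ⟨t', ht', hteq'⟩ := hwl'
    have h1 := (hbd t' ht').1
    have h2 := (hbd' t ht).1
    omega
  have hhi : hi = hi' := by
    obtain ⟨t, ht, hteq⟩ := hwh
    obtain ⟨t', ht', hteq'⟩ := hwh'
    have h1 := (hbd t' ht').2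
    have h2 := (hbd' t ht).2
    omega
  rw [hA, hB, hlo, hhi]
  exact pvArea_center hcmem hcmem' htall htall' hJ
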